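-- pv_equiv track=rewrite | github.com/Sanjeevikumar0207/TaskManager | streamlit_app.py | compute_current_streak
-- ===== SOURCE A (Python) =====
-- def compute_current_streak(parsed_streaks):
--     """Count consecutive True values from the latest date backwards."""
--     count = 0
--     if not parsed_streaks:
--         return 0
--     for d, done in reversed(parsed_streaks):
--         if done:
--             count += 1
--         else:
--             break
--     return count
-- ===== SOURCE B (Python) =====
-- def compute_current_streak(parsed_streaks):
--     """Count consecutive True values from the latest date backwards."""
--     last_false = -1
--     for i, (d, done) in enumerate(parsed_streaks):
--         if not done:
--             last_false = i
--     return len(parsed_streaks) - last_false - 1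
-- ===== Notes on version B (the rewrite author's own statement) =====
-- stated objective: alternative
-- what changed: Replaces the reverse scan with early break by a single forward pass that records the index of the last falsy entry and returns len - last_false - 1 (boundary index instead of incremental count).
import Mathlib
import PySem

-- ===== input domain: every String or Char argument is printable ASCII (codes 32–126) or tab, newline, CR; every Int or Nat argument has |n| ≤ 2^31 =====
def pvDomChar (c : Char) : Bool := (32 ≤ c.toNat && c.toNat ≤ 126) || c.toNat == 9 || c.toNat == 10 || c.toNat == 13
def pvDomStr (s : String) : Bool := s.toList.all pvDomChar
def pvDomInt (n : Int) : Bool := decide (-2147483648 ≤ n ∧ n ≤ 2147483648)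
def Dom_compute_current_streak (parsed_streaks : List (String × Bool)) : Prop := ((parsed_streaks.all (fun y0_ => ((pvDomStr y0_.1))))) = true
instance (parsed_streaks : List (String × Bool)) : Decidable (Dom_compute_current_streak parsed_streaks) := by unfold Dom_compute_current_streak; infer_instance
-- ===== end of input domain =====

-- B replaces A's reverse scan with early break by a forward pass recording the last falsy index (alternative decomposition).


-- ===== PORT A =====
-- loop over reversed(parsed_streaks), counting until the first falsy `done` (the break)
def csLoopA : List (String × Bool) → Int
  | [] => 0
  | (_, done) :: rest => if done then csLoopA rest + 1 else 0

def compute_current_streak (parsed_streaks : List (String × Bool)) : Int :=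
  if parsed_streaks = [] then 0
  else csLoopA parsed_streaks.reverse

-- ===== PORT B =====
def compute_current_streak_alt (parsed_streaks : List (String × Bool)) : Int :=
  let last_false : Int :=
    (PySem.List.enumerate parsed_streaks).foldl
      (fun acc p => if !p.2.2 then p.1 else acc) (-1)
  (parsed_streaks.length : Int) - last_false - 1

-- ===== PRECONDITION & SPEC =====
def Spec_compute_current_streak (parsed_streaks : List (String × Bool)) (out : Int) : Prop := out = compute_current_streak_alt parsed_streaks
instance (parsed_streaks : List (String × Bool)) (out : Int) : Decidable (Spec_compute_current_streak parsed_streaks out) := by unfold Spec_compute_current_streak; infer_instance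

-- ===== CLAIM (what is proved, stated in full; the proofs are below) =====
def Claim_equal_compute_current_streak : Prop := ∀ (parsed_streaks : List (String × Bool)), Dom_compute_current_streak parsed_streaks → Spec_compute_current_streak parsed_streaks (compute_current_streak parsed_streaks)

-- ===== LEMMAS AND PROOFS =====

theorem cs_snoc_eq (l : List (String × Bool)) :
    csLoopA (l.reverse) =
      (l.length : Int) -
        ((PySem.List.enumerate l).foldl (fun acc p => if !p.2.2 then p.1 else acc) (-1)) - 1 := by
  induction l using List.reverseRecOn with
  | nil => simp [csLoopA, PySem.List.enumerate]
  | append_singleton l x ih =>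
    rw [List.reverse_append, PySem.List.enumerate_append, List.foldl_append]
    simp only [List.reverse_singleton, List.singleton_append, PySem.List.enumerate,
      List.foldl_cons, List.foldl_nil, csLoopA, List.length_append, List.length_singleton]
    cases h : x.2 with
    | true => simp [ih]; omega
    | false => simp

theorem compute_current_streak_eq (l : List (String × Bool)) :
    compute_current_streak l = compute_current_streak_alt l := by
  unfold compute_current_streak compute_current_streak_alt
  split
  · subst ‹l = []›; simp [PySem.List.enumerate]
  · exact cs_snoc_eq l

-- ===== VERDICT (by name: the statement is the Claim_ definition above) =====
theorem compute_current_streak_spec : Claim_equal_compute_current_streak := by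
  intro l _
  unfold Spec_compute_current_streak
  exact compute_current_streak_eq l
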